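-- pv_equiv track=rewrite | github.com/AliceHsu0422/NTHU_NLP | hw4/109073516_week4.py | gne_correct_sent_comb
-- ===== SOURCE A (Python) =====
-- import copy
--
-- def gne_correct_sent_comb(index, sent, wrong_token_index, suggest_word):
--     cand_sent_list = []
--     if index not in wrong_token_index:
--         if index == (len(sent)-1):
--             # extend str
--             cand_sent_list.extend([copy.deepcopy(sent)])
--         else:
--             # extend call self
--             cand_sent_list.extend(gne_correct_sent_comb(index+1, sent, wrong_token_index, suggest_word))
--     else:
--         for word in suggest_word[index]:
--             sent[index]=word
--             if index == (len(sent)-1):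
--                 cand_sent_list.extend([copy.deepcopy(sent)])
--             else:
--                 cand_sent_list.extend(gne_correct_sent_comb(index+1, sent, wrong_token_index, suggest_word))
--     return cand_sent_list
-- ===== SOURCE B (Python) =====
-- import copy
--
--
-- def gne_correct_sent_comb(index, sent, wrong_token_index, suggest_word):
--     # Pure re-implementation: build the list of candidate SUFFIXES for
--     # positions pos..len(sent)-1 once by structural recursion (each level is
--     # computed a single time and shared, where A re-enumerates the whole
--     # subtree once per suggested word via in-place mutation of `sent`), then
--     # glue the unchanged prefix on. B does not mutate `sent`.
--     def suffixes(pos):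
--         opts = suggest_word[pos] if pos in wrong_token_index else [sent[pos]]
--         if pos == len(sent) - 1:
--             return [[w] for w in opts]
--         rests = suffixes(pos + 1)
--         return [[w] + r for w in opts for r in rests]
--
--     return [copy.deepcopy(sent[:index]) + suf for suf in suffixes(index)]
-- ===== Notes on version B (the rewrite author's own statement) =====
-- stated objective: alternative
-- what changed: Replaced A's mutating DFS (which rewrites sent[index] in place and re-enumerates the whole subtree once per suggested word, deep-copying sent at each leaf) by a pure structural recursion that builds the list of candidate suffixes once per position (sub-results shared) and glues the unchanged prefix on; B does not mutate sent (return-value equivalence).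
-- outside the precondition, e.g. on gne_correct_sent_comb(5, ['a', 'b'], [5], {5: []}): A returns [], B raises IndexError; on gne_correct_sent_comb(0, ['a', 'b'], [0, 1], {0: []}): A returns [], B raises KeyError
import Mathlib
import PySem

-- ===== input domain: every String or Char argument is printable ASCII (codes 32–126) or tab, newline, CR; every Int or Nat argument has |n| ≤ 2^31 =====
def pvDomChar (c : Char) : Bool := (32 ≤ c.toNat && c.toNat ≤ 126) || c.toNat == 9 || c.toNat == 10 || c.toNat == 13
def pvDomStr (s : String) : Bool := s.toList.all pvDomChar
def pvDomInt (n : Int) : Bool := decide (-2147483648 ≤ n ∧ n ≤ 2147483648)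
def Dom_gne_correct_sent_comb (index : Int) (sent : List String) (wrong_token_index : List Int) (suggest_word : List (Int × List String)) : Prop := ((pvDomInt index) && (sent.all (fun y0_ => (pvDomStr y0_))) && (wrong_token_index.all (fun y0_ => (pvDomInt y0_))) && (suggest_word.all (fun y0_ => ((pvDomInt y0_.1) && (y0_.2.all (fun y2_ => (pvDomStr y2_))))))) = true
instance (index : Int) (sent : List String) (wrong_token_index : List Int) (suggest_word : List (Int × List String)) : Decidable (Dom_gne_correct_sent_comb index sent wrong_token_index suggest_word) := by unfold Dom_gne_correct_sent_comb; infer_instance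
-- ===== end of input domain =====

-- B replaces A's mutating DFS (one subtree re-enumeration per suggested word) by a pure
-- structural recursion building each candidate-suffix level once; A mutates `sent` in
-- place and B does not — the equivalence proved here is about the RETURN value only.

-- `d[k]`: Python dict lookup = first match in the association list (used by both ports).
def swGet (sw : List (Int × List String)) (k : Int) : Option (List String) :=
  (PySem.Dict.mk sw).get? k


-- ===== PORT A =====
-- Fuelled transliteration of A's recursion; the pair threads the list `sent` that A
-- mutates in place (`sent[index] = word` → PySem.List.pySetD, IndexError excluded by Pre_;
-- `suggest_word[index]` KeyError excluded by Pre_; copy.deepcopy(sent) = sent, lists of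
-- immutable strings). Fuel sent.length + 1 suffices: under Pre_ the recursion depth is
-- sent.length - index.
mutual
def gneAgo (wti : List Int) (sw : List (Int × List String)) :
    Nat → Int → List String → List (List String) × List String
  | 0, _, sent => ([], sent)
  | fuel + 1, index, sent =>
    if ¬ wti.contains index then
      if index == (sent.length : Int) - 1 then ([sent], sent)
      else gneAgo wti sw fuel (index + 1) sent
    else
      ((swGet sw index).getD []).foldl (stepA wti sw fuel index) ([], sent)

-- the body of A's `for word in suggest_word[index]` loop
def stepA (wti : List Int) (sw : List (Int × List String)) (fuel : Nat) (index : Int)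
    (st : List (List String) × List String) (word : String) :
    List (List String) × List String :=
  let s' := PySem.List.pySetD st.2 index word
  if index == (s'.length : Int) - 1 then (st.1 ++ [s'], s')
  else
    let r := gneAgo wti sw fuel (index + 1) s'
    (st.1 ++ r.1, r.2)
end


def gne_correct_sent_comb (index : Int) (sent : List String) (wrong_token_index : List Int) (suggest_word : List (Int × List String)) : List (List String) :=
  (gneAgo wrong_token_index suggest_word (sent.length + 1) index sent).1

-- ===== PORT B =====
-- Source B's `suffixes(pos)`: the candidate suffixes for positions pos..len(sent)-1, built
-- once per level (`rests` shared). Fuelled like port A (`sent[pos]` → pyGetD and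
-- `suggest_word[pos]` → swGet ... getD []: IndexError/KeyError excluded by Pre_; under
-- Pre_ the recursion depth is sent.length - pos, so fuel sent.length + 1 suffices).
def sufB (wti : List Int) (sw : List (Int × List String)) :
    Nat → Int → List String → List (List String)
  | 0, _, _ => []
  | fuel + 1, pos, sent =>
    let opts := if wti.contains pos then (swGet sw pos).getD [] else [PySem.List.pyGetD sent pos ""]
    if pos == (sent.length : Int) - 1 then opts.map (fun w => [w])
    else
      let rests := sufB wti sw fuel (pos + 1) sent
      opts.flatMap (fun w => rests.map (fun r => [w] ++ r))

def gne_correct_sent_comb_alt (index : Int) (sent : List String) (wrong_token_index : List Int) (suggest_word : List (Int × List String)) : List (List String) :=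
  (sufB wrong_token_index suggest_word (sent.length + 1) index sent).map
    -- copy.deepcopy(sent[:index]) + suf  (deepcopy = identity on immutable strings)
    (fun suf => PySem.List.slice sent none (some index) ++ suf)

-- ===== PRECONDITION & SPEC =====
-- Pre_ is the natural domain: `index` names a real position of `sent` and every wrong
-- position from `index` on has an entry in `suggest_word`. It excludes inputs where the
-- Python A raises (KeyError on a missing suggestion key, RecursionError past the end,
-- IndexError below -len(sent)) and the out-of-natural-domain inputs where A still returns
-- only accidentally (negative-index wraparound; an empty suggestion list or index ≥
-- len(sent) cutting the recursion short) — see the cites in claim.json.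
def Pre_gne_correct_sent_comb (index : Int) (sent : List String) (wrong_token_index : List Int) (suggest_word : List (Int × List String)) : Prop :=
  0 ≤ index ∧ index < (sent.length : Int) ∧
  ∀ p ∈ PySem.List.pyRange index (sent.length : Int) 1,
    wrong_token_index.contains p = true → (swGet suggest_word p).isSome = true

instance (index : Int) (sent : List String) (wrong_token_index : List Int) (suggest_word : List (Int × List String)) : Decidable (Pre_gne_correct_sent_comb index sent wrong_token_index suggest_word) := by
  unfold Pre_gne_correct_sent_comb; infer_instance

def pvWitness_gne_correct_sent_comb : Int × List String × List Int × (List (Int × List String)) :=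
  (0, ["a", "b"], [1], [(1, ["x", "y"])])

def Spec_gne_correct_sent_comb (index : Int) (sent : List String) (wrong_token_index : List Int) (suggest_word : List (Int × List String)) (out : List (List String)) : Prop := out = gne_correct_sent_comb_alt index sent wrong_token_index suggest_word
instance (index : Int) (sent : List String) (wrong_token_index : List Int) (suggest_word : List (Int × List String)) (out : List (List String)) : Decidable (Spec_gne_correct_sent_comb index sent wrong_token_index suggest_word out) := by unfold Spec_gne_correct_sent_comb; infer_instance

-- ===== CLAIM (what is proved, stated in full; the proofs are below) =====
def Claim_equal_gne_correct_sent_comb : Prop := ∀ (index : Int) (sent : List String) (wrong_token_index : List Int) (suggest_word : List (Int × List String)), Dom_gne_correct_sent_comb index sent wrong_token_index suggest_word → Pre_gne_correct_sent_comb index sent wrong_token_index suggest_word → Spec_gne_correct_sent_comb index sent wrong_token_index suggest_word (gne_correct_sent_comb index sent wrong_token_index suggest_word)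

-- ===== LEMMAS AND PROOFS =====

-- proof-side characterisation of Source B's per-position choice lists (used by the lemmas)
def chB (wti : List Int) (sw : List (Int × List String)) (index : Int) (sent : List String) : List (List String) :=
  (PySem.List.pyRange index (sent.length : Int) 1).map
    (fun pos => if wti.contains pos then (swGet sw pos).getD [] else [PySem.List.pyGetD sent pos ""])

def prodList (cs : List (List String)) : List (List String) :=
  match cs with
  | [] => [[]]
  | c :: rest => c.flatMap (fun w => (prodList rest).map (fun t => w :: t))

lemma take_congr {s t : List String} (k : Nat) (_hlen : s.length = t.length)
    (h : ∀ p : Nat, p < k → s[p]? = t[p]?) : s.take k = t.take k := by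
  apply List.ext_getElem?
  intro p
  simp only [List.getElem?_take]
  split_ifs with hp
  · exact h p hp
  · rfl

lemma take_snoc (s : List String) (k : Nat) (hk : k < s.length) (d : String) :
    s.take k ++ [s.getD k d] = s.take (k + 1) := by
  rw [List.take_add_one]
  congr 1
  simp [List.getElem?_eq_getElem hk, List.getD]

lemma chB_congr (wti : List Int) (sw : List (Int × List String)) (index : Int)
    {s t : List String} (h0 : 0 ≤ index) (hlen : s.length = t.length)
    (h : ∀ p : Nat, p < s.length → wti.contains (p : Int) = false → s[p]? = t[p]?) :
    chB wti sw index s = chB wti sw index t := by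
  unfold chB
  rw [hlen]
  apply List.map_congr_left
  intro pos hpos
  have hmem : index ≤ pos ∧ pos < (t.length : Int) := PySem.List.mem_pyRange_one.mp hpos
  by_cases hw : wti.contains pos
  · have hmemw : pos ∈ wti := by simpa using hw
    simp [hmemw]
  · have h0p : 0 ≤ pos := le_trans h0 hmem.1
    have hps : pos < (s.length : Int) := by omega
    have hpn : pos.toNat < s.length := by omega
    rw [if_neg hw, if_neg hw,
        PySem.List.pyGetD_eq_getElem _ _ h0p hps,
        PySem.List.pyGetD_eq_getElem _ _ h0p (by omega : pos < (t.length : Int))]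
    have := h pos.toNat hpn (by
      have : ((pos.toNat : Nat) : Int) = pos := by omega
      rw [this]; exact eq_false_of_ne_true hw)
    have h1 : s[pos.toNat]? = some (s[pos.toNat]'hpn) := List.getElem?_eq_getElem hpn
    have h2 : t[pos.toNat]? = some (t[pos.toNat]'(by omega)) := List.getElem?_eq_getElem (by omega)
    rw [h1, h2] at this
    simp only [Option.some.injEq] at this
    simp [this]

lemma set_agree (wti : List Int) (s sent0 : List String) (index : Int) (w : String)
    (h0 : 0 ≤ index) (hw : wti.contains index = true)
    (h : ∀ p : Nat, ((p : Int) < index ∨ wti.contains (p : Int) = false) → s[p]? = sent0[p]?) :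
    ∀ p : Nat, ((p : Int) < index ∨ wti.contains (p : Int) = false) →
      (s.set index.toNat w)[p]? = sent0[p]? := by
  intro p hp
  have hne : p ≠ index.toNat := by
    rcases hp with hp | hp
    · omega
    · intro he; rw [he] at hp; rw [Int.toNat_of_nonneg h0] at hp; rw [hw] at hp; cases hp
  rw [List.getElem?_set_ne (by omega : index.toNat ≠ p)]
  exact h p hp

lemma fold_spec (wti : List Int) (sw : List (Int × List String)) (fuel : Nat)
    (index : Int) (sent0 : List String)
    (h0 : 0 ≤ index) (hlt : index < (sent0.length : Int))
    (hw : wti.contains index = true)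
    (IH : ∀ s : List String, s.length = sent0.length → index + 1 < (s.length : Int) →
      (gneAgo wti sw fuel (index + 1) s).1
          = (prodList (chB wti sw (index + 1) s)).map (fun c => s.take (index + 1).toNat ++ c)
        ∧ (gneAgo wti sw fuel (index + 1) s).2.length = s.length
        ∧ ∀ p : Nat, ((p : Int) < index + 1 ∨ wti.contains (p : Int) = false) →
            (gneAgo wti sw fuel (index + 1) s).2[p]? = s[p]?) :
    ∀ (ws : List String) (acc : List (List String)) (s : List String),
      s.length = sent0.length →
      (∀ p : Nat, ((p : Int) < index ∨ wti.contains (p : Int) = false) → s[p]? = sent0[p]?) →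
      (ws.foldl (stepA wti sw fuel index) (acc, s)).1
          = acc ++ ws.flatMap (fun w => (prodList (chB wti sw (index + 1) sent0)).map
              (fun c => (sent0.take index.toNat ++ [w]) ++ c))
        ∧ (ws.foldl (stepA wti sw fuel index) (acc, s)).2.length = sent0.length
        ∧ ∀ p : Nat, ((p : Int) < index ∨ wti.contains (p : Int) = false) →
            (ws.foldl (stepA wti sw fuel index) (acc, s)).2[p]? = sent0[p]? := by
  intro ws
  induction ws with
  | nil => intro acc s hlen hagree; refine ⟨by simp, by simpa using hlen, by simpa using hagree⟩
  | cons w rest ih =>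
    intro acc s hlen hagree
    rw [List.foldl_cons]
    set s' : List String := PySem.List.pySetD s index w with hs'
    have hset : s' = s.set index.toNat w := PySem.List.pySetD_of_nonneg s w h0
    have hlen' : s'.length = sent0.length := by rw [hset]; simpa using hlen
    have hagree' : ∀ p : Nat, ((p : Int) < index ∨ wti.contains (p : Int) = false) →
        s'[p]? = sent0[p]? := by
      rw [hset]; exact set_agree wti s sent0 index w h0 hw hagree
    have htakes : s'.take index.toNat = sent0.take index.toNat := by
      apply take_congr _ (by omega)
      intro p hp
      exact hagree' p (Or.inl (by omega))
    have hgetk : s'.getD index.toNat "" = w := by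
      rw [hset]; rw [List.getD_eq_getElem?_getD]
      rw [List.getElem?_set_self (by omega)]; rfl
    by_cases hleaf : index = (sent0.length : Int) - 1
    · -- leaf level: index == len - 1
      have hcond : (index == (s'.length : Int) - 1) = true := by
        rw [hlen']; exact beq_iff_eq.mpr hleaf
      have hstep : stepA wti sw fuel index (acc, s) w = (acc ++ [s'], s') := by
        unfold stepA; rw [← hs', if_pos hcond]
      rw [hstep]
      have hchnil : chB wti sw (index + 1) sent0 = [] := by
        unfold chB; rw [PySem.List.pyRange_one_eq_nil (by omega)]; rfl
      have hs'eq : s' = sent0.take index.toNat ++ [w] := by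
        have h2 : s'.take index.toNat ++ [s'.getD index.toNat ""] = s'.take (index.toNat + 1) :=
          take_snoc s' index.toNat (by omega) ""
        rw [hgetk, htakes] at h2
        rw [h2, List.take_of_length_le (by omega)]
      obtain ⟨r1, r2, r3⟩ := ih (acc ++ [s']) s' hlen' hagree'
      refine ⟨?_, r2, r3⟩
      rw [r1]
      simp only [List.flatMap_cons, hchnil]
      simp [prodList, hs'eq]
    · -- internal level
      have hcond : (index == (s'.length : Int) - 1) = false := by
        rw [hlen']; exact beq_eq_false_iff_ne.mpr hleaf
      have hstep : stepA wti sw fuel index (acc, s) w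
          = (acc ++ (gneAgo wti sw fuel (index + 1) s').1, (gneAgo wti sw fuel (index + 1) s').2) := by
        unfold stepA; rw [← hs', if_neg (by simp [hcond])]
      rw [hstep]
      have hlt1 : index + 1 < (s'.length : Int) := by rw [hlen']; omega
      obtain ⟨g1, g2, g3⟩ := IH s' hlen' hlt1
      have hch : chB wti sw (index + 1) s' = chB wti sw (index + 1) sent0 := by
        apply chB_congr wti sw (index + 1) (by omega) (by omega)
        intro p hp hnw
        rw [hagree' p (Or.inr hnw)]
      have htake1 : s'.take (index + 1).toNat = sent0.take index.toNat ++ [w] := by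
        have h1 : (index + 1).toNat = index.toNat + 1 := by omega
        rw [h1, ← take_snoc s' index.toNat (by omega) "", hgetk, htakes]
      obtain ⟨r1, r2, r3⟩ := ih (acc ++ (gneAgo wti sw fuel (index + 1) s').1)
        (gneAgo wti sw fuel (index + 1) s').2
        (by rw [g2]; exact hlen')
        (by intro p hp
            rcases hp with hp | hp
            · rw [g3 p (Or.inl (by omega))]; exact hagree' p (Or.inl hp)
            · rw [g3 p (Or.inr hp)]; exact hagree' p (Or.inr hp))
      refine ⟨?_, r2, r3⟩
      rw [r1, g1, hch, htake1]
      simp [List.append_assoc]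

lemma sufB_eq_prod (wti : List Int) (sw : List (Int × List String)) :
    ∀ (fuel : Nat) (pos : Int) (sent : List String),
      0 ≤ pos → pos < (sent.length : Int) → (sent.length : Int) - pos ≤ (fuel : Int) →
      sufB wti sw fuel pos sent = prodList (chB wti sw pos sent) := by
  intro fuel
  induction fuel with
  | zero => intro pos sent h0 hlt hfuel; exfalso; simp at hfuel; omega
  | succ fuel IH =>
    intro pos sent h0 hlt hfuel
    have hchcons : chB wti sw pos sent
        = (if wti.contains pos then (swGet sw pos).getD []
           else [PySem.List.pyGetD sent pos ""]) :: chB wti sw (pos + 1) sent := by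
      unfold chB
      rw [PySem.List.pyRange_one_cons hlt, List.map_cons]
    by_cases hleaf : pos = (sent.length : Int) - 1
    · have hchnil : chB wti sw (pos + 1) sent = [] := by
        unfold chB; rw [PySem.List.pyRange_one_eq_nil (by omega)]; rfl
      conv_lhs => rw [sufB]
      rw [if_pos (beq_iff_eq.mpr hleaf), hchcons, hchnil]
      simp only [prodList, List.map_eq_flatMap, List.flatMap_cons, List.flatMap_nil,
        List.append_nil]
    · conv_lhs => rw [sufB]
      rw [if_neg (by simp [hleaf]), IH (pos + 1) sent (by omega) (by omega) (by omega),
        hchcons]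
      simp [prodList]

lemma gneAgo_spec (wti : List Int) (sw : List (Int × List String)) :
    ∀ (fuel : Nat) (index : Int) (sent : List String),
      0 ≤ index → index < (sent.length : Int) → (sent.length : Int) - index ≤ (fuel : Int) →
      (gneAgo wti sw fuel index sent).1
          = (prodList (chB wti sw index sent)).map (fun c => sent.take index.toNat ++ c)
        ∧ (gneAgo wti sw fuel index sent).2.length = sent.length
        ∧ ∀ p : Nat, ((p : Int) < index ∨ wti.contains (p : Int) = false) →
            (gneAgo wti sw fuel index sent).2[p]? = sent[p]? := by
  intro fuel
  induction fuel with
  | zero => intro index sent h0 hlt hfuel; exfalso; simp at hfuel; omega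
  | succ fuel IH =>
    intro index sent h0 hlt hfuel
    have hchcons : chB wti sw index sent
        = (if wti.contains index then (swGet sw index).getD []
           else [PySem.List.pyGetD sent index ""]) :: chB wti sw (index + 1) sent := by
      unfold chB
      rw [PySem.List.pyRange_one_cons hlt, List.map_cons]
    by_cases hw : wti.contains index = true
    · -- wrong position: the for-loop
      have hstep : gneAgo wti sw (fuel + 1) index sent
          = ((swGet sw index).getD []).foldl (stepA wti sw fuel index) ([], sent) := by
        unfold gneAgo
        rw [if_neg (by simpa using hw)]
      rw [hstep]
      obtain ⟨f1, f2, f3⟩ := fold_spec wti sw fuel index sent h0 hlt hw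
        (fun s hlen hlt1 => IH (index + 1) s (by omega) hlt1 (by omega))
        ((swGet sw index).getD []) [] sent rfl (fun _ _ => rfl)
      refine ⟨?_, f2, f3⟩
      rw [f1, hchcons, if_pos hw]
      simp only [prodList, List.nil_append]
      rw [List.map_flatMap]
      refine congrArg (fun g => List.flatMap g ((swGet sw index).getD [])) (funext fun w => ?_)
      rw [List.map_map]
      apply List.map_congr_left
      intro c _
      simp [List.append_assoc]
    · -- not a wrong position
      have hw' : wti.contains index = false := by simpa using hw
      by_cases hleaf : index = (sent.length : Int) - 1
      · have hstep : gneAgo wti sw (fuel + 1) index sent = ([sent], sent) := by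
          unfold gneAgo
          rw [if_pos (by simpa using hw'), if_pos (beq_iff_eq.mpr hleaf)]
        rw [hstep]
        refine ⟨?_, rfl, fun _ _ => rfl⟩
        have hchnil : chB wti sw (index + 1) sent = [] := by
          unfold chB; rw [PySem.List.pyRange_one_eq_nil (by omega)]; rfl
        rw [hchcons, if_neg (by simpa using hw'), hchnil]
        have htk : sent.take index.toNat ++ [sent.getD index.toNat ""] = sent.take (index.toNat + 1) :=
          take_snoc sent index.toNat (by omega) ""
        have hg : sent.getD index.toNat "" = sent[index.toNat]'(by omega) := by
          rw [List.getD_eq_getElem?_getD, List.getElem?_eq_getElem (by omega)]; rfl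
        rw [hg] at htk
        rw [PySem.List.pyGetD_eq_getElem _ _ h0 hlt]
        simp only [prodList, List.flatMap_cons, List.flatMap_nil, List.map_cons, List.map_nil,
          List.append_nil]
        rw [htk, List.take_of_length_le (by omega)]
      · have hstep : gneAgo wti sw (fuel + 1) index sent
            = gneAgo wti sw fuel (index + 1) sent := by
          conv_lhs => rw [gneAgo]
          rw [if_pos (by simpa using hw'), if_neg (by simp [hleaf])]
        rw [hstep]
        obtain ⟨g1, g2, g3⟩ := IH (index + 1) sent (by omega) (by omega) (by omega)
        refine ⟨?_, g2, fun p hp => g3 p (by rcases hp with hp | hp; exact Or.inl (by omega); exact Or.inr hp)⟩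
        rw [g1, hchcons, if_neg (by simpa using hw')]

        simp only [prodList, List.flatMap_cons, List.flatMap_nil, List.append_nil]
        rw [List.map_map]
        apply List.map_congr_left
        intro c _
        simp only [Function.comp]
        have h1 : (index + 1).toNat = index.toNat + 1 := by omega
        have hg : sent.getD index.toNat "" = sent[index.toNat]'(by omega) := by
          rw [List.getD_eq_getElem?_getD, List.getElem?_eq_getElem (by omega)]; rfl
        rw [h1, ← take_snoc sent index.toNat (by omega) "", hg,
          PySem.List.pyGetD_eq_getElem _ _ h0 hlt]
        simp only [List.append_assoc, List.singleton_append]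

-- ===== VERDICT (by name: the statement is the Claim_ definition above) =====
theorem gne_correct_sent_comb_spec : Claim_equal_gne_correct_sent_comb := by
  intro index sent wti sw _hdom hpre
  obtain ⟨h0, hlt, _⟩ := hpre
  unfold Spec_gne_correct_sent_comb gne_correct_sent_comb gne_correct_sent_comb_alt
  rw [sufB_eq_prod wti sw (sent.length + 1) index sent h0 hlt (by push_cast; omega),
    PySem.List.slice_to sent h0]
  exact (gneAgo_spec wti sw (sent.length + 1) index sent h0 hlt (by push_cast; omega)).1
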